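-- pv_equiv track=rewrite | github.com/Chopinsky/algo-problems | challenges/3999/3887-incremental-even-weighted-cycle-queries.py | numberOfEdgesAdded
-- ===== SOURCE A (Python) =====
-- from typing import List
--
-- def numberOfEdgesAdded(n: int, edges: List[List[int]]) -> int:
--   p = [i for i in range(n)]
--   size = [1]*n
--   parity = [0]*n
--
--   def find(x: int):
--     # is root
--     if p[x] == x:
--       return x, 0
--
--     # find the real root
--     root, par = find(p[x])
--
--     # lazy updates
--     p[x] = root
--     parity[x] ^= par
--
--     return p[x], parity[x]
--
--   def union(u: int, v: int, w: int) -> bool: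
--     pu, xu = find(u)
--     pv, xv = find(v)
--
--     # same root, check parity
--     if pu == pv:
--       return (xu^xv == w)
--
--     # union
--     if size[pu] < size[pv]:
--       pu, pv = pv, pu
--       xu, xv = xv, xu
--
--     p[pv] = pu
--     size[pu] += size[pv]
--
--     # update parity, must stay consistent from u-> pu, v-> pv
--     parity[pv] = xu^xv^w
--
--     return True
--
--   count = 0
--   for u, v, w in edges:
--     if union(u, v, w):
--       count += 1
--
--   return count
-- ===== SOURCE B (Python) =====
-- from typing import List
--
-- def numberOfEdgesAdded(n: int, edges: List[List[int]]) -> int: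
--   # eager "quick-find": each node stores its component label and its parity
--   # to that label; a union relabels the smaller component in one scan
--   comp = list(range(n))
--   par = [0] * n
--   size = [1] * n
--
--   count = 0
--   for u, v, w in edges:
--     cu, cv = comp[u], comp[v]
--     gu, gv = par[u], par[v]
--     if cu == cv:
--       if (gu ^ gv) == w:
--         count += 1
--       continue
--     if size[cu] < size[cv]:
--       cu, cv, gu, gv = cv, cu, gv, gu
--     d = gu ^ gv ^ w
--     for i in range(n):
--       if comp[i] == cv:
--         comp[i] = cu
--         par[i] ^= d
--     size[cu] += size[cv]
--     count += 1
--   return count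
-- ===== Notes on version B (the rewrite author's own statement) =====
-- stated objective: alternative
-- what changed: The lazy union-find forest (recursive find with path compression, parity stored along parent pointers) is replaced by an eager quick-find structure: every node stores its component label and its parity to that label directly, a union relabels the smaller component in one scan, and there is no find and no recursion at all.
import Mathlib
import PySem

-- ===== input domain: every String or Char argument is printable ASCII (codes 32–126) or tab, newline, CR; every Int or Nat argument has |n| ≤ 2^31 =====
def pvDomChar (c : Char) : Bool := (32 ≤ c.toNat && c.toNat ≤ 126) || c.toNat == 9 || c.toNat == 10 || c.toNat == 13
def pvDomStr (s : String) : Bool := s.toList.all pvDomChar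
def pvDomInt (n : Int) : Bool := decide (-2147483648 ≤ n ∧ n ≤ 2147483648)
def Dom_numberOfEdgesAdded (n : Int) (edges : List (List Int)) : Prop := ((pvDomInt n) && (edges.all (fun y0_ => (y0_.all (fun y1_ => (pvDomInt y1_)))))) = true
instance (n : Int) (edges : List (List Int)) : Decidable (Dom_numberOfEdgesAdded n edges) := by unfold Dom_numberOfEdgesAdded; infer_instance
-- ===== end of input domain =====

-- B replaces A's lazy parity union-find (recursive find with path compression over
-- parent pointers) by an eager quick-find: each node stores its component label and
-- its parity to that label, and a union relabels the smaller component in one scan.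
-- Objective: alternative algorithm/data structure; not faster (A is near-linear,
-- B is O(n*m)). Both versions mutate only function-local arrays.

-- Python indexing with negative-index wraparound: cell is the effective array
-- index of i; exact for -len ≤ i < len (all indices admitted by Pre_)
def cell (m : Nat) (i : Int) : Nat := if i < 0 then (i + (m : Int)).toNat else i.toNat
def lget (l : List Int) (i : Int) : Int := l.getD (cell l.length i) 0
def lset (l : List Int) (i v : Int) : List Int := l.set (cell l.length i) v

-- ===== PORT A =====
-- recursive find with path compression on the unwind (fuel only makes the
-- recursion structural; it never runs out on inputs satisfying Pre_)
def findA : Nat → List Int → List Int → Int → Int × Int × List Int × List Int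
  | 0, p, q, x => (x, 0, p, q)
  | F + 1, p, q, x =>
    if lget p x = x then (x, 0, p, q)
    else
      match findA F p q (lget p x) with
      | (root, par, p1, q1) =>
        let p2 := lset p1 x root
        let q2 := lset q1 x (PySem.Int.bxor (lget q1 x) par)
        (lget p2 x, lget q2 x, p2, q2)

def unionA (F : Nat) (p q sz : List Int) (u v w : Int) :
    Bool × List Int × List Int × List Int :=
  match findA F p q u with
  | (pu, xu, p1, q1) =>
    match findA F p1 q1 v with
    | (pv, xv, p2, q2) =>
      if pu = pv then (decide (PySem.Int.bxor xu xv = w), p2, q2, sz)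
      else
        match (if lget sz pu < lget sz pv then (pv, pu, xv, xu) else (pu, pv, xu, xv)) with
        | (pu', pv', xu', xv') =>
          let p3 := lset p2 pv' pu'
          let sz1 := lset sz pu' (lget sz pu' + lget sz pv')
          let q3 := lset q2 pv' (PySem.Int.bxor (PySem.Int.bxor xu' xv') w)
          (true, p3, q3, sz1)

def loopA (F : Nat) : List (List Int) → List Int → List Int → List Int → Int → Int
  | [], _, _, _, count => count
  | e :: rest, p, q, sz, count =>
    match unionA F p q sz (e.getD 0 0) (e.getD 1 0) (e.getD 2 0) with
    | (ok, p', q', sz') => loopA F rest p' q' sz' (if ok then count + 1 else count)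

def numberOfEdgesAdded (n : Int) (edges : List (List Int)) : Int :=
  loopA (3 * edges.length + 2) edges
    ((List.range n.toNat).map (fun (i : Nat) => (i : Int)))
    (List.replicate n.toNat 0)
    (List.replicate n.toNat 1)
    0

-- ===== PORT B =====
-- eager relabeling scan: 'for i in range(n): if comp[i] == cv: comp[i] = cu; par[i] ^= d'
def relabelB (cv cu d : Int) : List Nat → List Int × List Int → List Int × List Int
  | [], st => st
  | i :: is, (comp, par) =>
    if lget comp (i : Int) = cv then
      relabelB cv cu d is
        (lset comp (i : Int) cu, lset par (i : Int) (PySem.Int.bxor (lget par (i : Int)) d))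
    else relabelB cv cu d is (comp, par)

-- the single edge loop of Source B: direct label/parity lookups, no find
def loopB (nn : Nat) : List (List Int) → List Int → List Int → List Int → Int → Int
  | [], _, _, _, count => count
  | e :: rest, comp, par, sz, count =>
    let u := e.getD 0 0
    let v := e.getD 1 0
    let w := e.getD 2 0
    let cu := lget comp u
    let cv := lget comp v
    let gu := lget par u
    let gv := lget par v
    if cu = cv then
      loopB nn rest comp par sz (if PySem.Int.bxor gu gv = w then count + 1 else count)
    else
      match (if lget sz cu < lget sz cv then (cv, cu, gv, gu) else (cu, cv, gu, gv)) with
      | (cu', cv', gu', gv') =>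
        let d := PySem.Int.bxor (PySem.Int.bxor gu' gv') w
        match relabelB cv' cu' d (List.range nn) (comp, par) with
        | (comp', par') =>
          loopB nn rest comp' par' (lset sz cu' (lget sz cu' + lget sz cv')) (count + 1)

def numberOfEdgesAdded_alt (n : Int) (edges : List (List Int)) : Int :=
  loopB n.toNat edges
    ((List.range n.toNat).map (fun (i : Nat) => (i : Int)))
    (List.replicate n.toNat 0)
    (List.replicate n.toNat 1)
    0

-- ===== PRECONDITION & SPEC =====
-- Pre_ excludes exactly the inputs where A raises: edges of arity ≠ 3 (ValueError on
-- unpacking) and endpoints outside [-n, n) (IndexError); endpoints in [-n, 0) index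
-- with Python's negative-index wraparound and are admitted.
def Pre_numberOfEdgesAdded (n : Int) (edges : List (List Int)) : Prop :=
  (0 ≤ n ∨ edges = []) ∧ ∀ e ∈ edges, e.length = 3 ∧
    -n ≤ e.getD 0 0 ∧ e.getD 0 0 < n ∧ -n ≤ e.getD 1 0 ∧ e.getD 1 0 < n
instance (n : Int) (edges : List (List Int)) : Decidable (Pre_numberOfEdgesAdded n edges) := by
  unfold Pre_numberOfEdgesAdded; infer_instance

def pvWitness_numberOfEdgesAdded : Int × List (List Int) :=
  (3, [[0, 1, 1], [1, 2, 0], [0, 2, 1]])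

def Spec_numberOfEdgesAdded (n : Int) (edges : List (List Int)) (out : Int) : Prop := out = numberOfEdgesAdded_alt n edges
instance (n : Int) (edges : List (List Int)) (out : Int) : Decidable (Spec_numberOfEdgesAdded n edges out) := by unfold Spec_numberOfEdgesAdded; infer_instance

-- ===== CLAIM (what is proved, stated in full; the proofs are below) =====
def Claim_equal_numberOfEdgesAdded : Prop := ∀ (n : Int) (edges : List (List Int)), Dom_numberOfEdgesAdded n edges → Pre_numberOfEdgesAdded n edges → Spec_numberOfEdgesAdded n edges (numberOfEdgesAdded n edges)

-- ===== LEMMAS AND PROOFS =====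

-- ---- xor algebra ----
lemma bxor_dec (s1 s2 : Bool) (n1 n2 : Nat) :
    PySem.Int.bxor (if s1 then -(n1:Int)-1 else (n1:Int)) (if s2 then -(n2:Int)-1 else (n2:Int))
      = (if xor s1 s2 then -((n1 ^^^ n2 : Nat):Int)-1 else ((n1 ^^^ n2 : Nat):Int)) := by
  cases s1 <;> cases s2
  · simp [PySem.Int.bxor]
  · simp [PySem.Int.bxor]
    intro h; exact absurd h (by omega)
  · simp [PySem.Int.bxor]
    intro h; exact absurd h (by omega)
  · simp [PySem.Int.bxor]
    rw [if_neg (show ¬(1 ≤ -(n1:Int)) by omega), if_neg (show ¬(1 ≤ -(n2:Int)) by omega)]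

lemma bxor_surj (a : Int) : ∃ (s : Bool) (m : Nat), a = (if s then -(m:Int)-1 else (m:Int)) := by
  by_cases h : 0 ≤ a
  · exact ⟨false, a.toNat, by simp; omega⟩
  · exact ⟨true, (-a-1).toNat, by simp; omega⟩

lemma bxor_assoc (a b c : Int) :
    PySem.Int.bxor (PySem.Int.bxor a b) c = PySem.Int.bxor a (PySem.Int.bxor b c) := by
  obtain ⟨s1, n1, rfl⟩ := bxor_surj a
  obtain ⟨s2, n2, rfl⟩ := bxor_surj b
  obtain ⟨s3, n3, rfl⟩ := bxor_surj c
  rw [bxor_dec, bxor_dec, bxor_dec, bxor_dec, Nat.xor_assoc, Bool.xor_assoc]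

lemma zero_bxor (a : Int) : PySem.Int.bxor 0 a = a := by
  rw [PySem.Int.bxor_comm]; exact PySem.Int.bxor_zero a

-- ---- lget / lset basics ----
lemma lset_length (l : List Int) (i v : Int) : (lset l i v).length = l.length := by
  simp [lset]

lemma cell_lset (l : List Int) (i v j : Int) :
    cell (lset l i v).length j = cell l.length j := by
  unfold lset
  rw [List.length_set]

lemma lget_lset_self {l : List Int} {i j : Int} (h : cell l.length j = cell l.length i)
    (hlen : cell l.length i < l.length) (v : Int) : lget (lset l i v) j = v := by
  unfold lget
  rw [cell_lset, h]
  unfold lset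
  rw [List.getD_eq_getElem?_getD, List.getElem?_set_self (by simpa using hlen)]
  rfl

lemma lget_lset_ne {l : List Int} {i j : Int} (h : cell l.length j ≠ cell l.length i)
    (v : Int) : lget (lset l i v) j = lget l j := by
  unfold lget
  rw [cell_lset]
  unfold lset
  rw [List.getD_eq_getElem?_getD, List.getD_eq_getElem?_getD,
    List.getElem?_set_ne (Ne.symm h)]

lemma lget_lset_or (l : List Int) (i j v : Int) :
    lget (lset l i v) j = lget l j ∨ lget (lset l i v) j = v := by
  by_cases h : cell l.length j = cell l.length i
  · by_cases hlt : cell l.length i < l.length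
    · exact Or.inr (lget_lset_self h hlt v)
    · left
      unfold lget lset
      rw [List.length_set, List.set_eq_of_length_le (by omega)]
  · exact Or.inl (lget_lset_ne h v)

-- in-range indices (Python's valid indices, wraparound included)
def InR (p : List Int) (x : Int) : Prop := -(p.length : Int) ≤ x ∧ x < (p.length : Int)

lemma cell_lt {m : Nat} {x : Int} (h0 : -(m : Int) ≤ x) (h1 : x < (m : Int)) :
    cell m x < m := by
  unfold cell
  split <;> omega

lemma cell_natCast (m k : Nat) : cell m (k : Int) = k := by
  unfold cell
  rw [if_neg (by omega)]
  simp

lemma cell_ne_of_canon {m : Nat} {a b : Int} (ha0 : 0 ≤ a) (hb0 : 0 ≤ b) (hab : a ≠ b) :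
    cell m a ≠ cell m b := by
  unfold cell
  rw [if_neg (by omega), if_neg (by omega)]
  omega

lemma lenInR {p p' : List Int} {x : Int} (h : p'.length = p.length) (hx : InR p' x) :
    InR p x := ⟨by rw [← h]; exact hx.1, by rw [← h]; exact hx.2⟩

def RangeOK (p : List Int) : Prop := ∀ v ∈ p, 0 ≤ v ∧ v < (p.length : Int)

lemma lget_mem {p : List Int} {x : Int} (h : InR p x) : lget p x ∈ p := by
  unfold lget
  rw [List.getD_eq_getElem?_getD, List.getElem?_eq_getElem (cell_lt h.1 h.2)]
  exact List.getElem_mem _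

lemma lget_cell_congr {p : List Int} {x y : Int}
    (h : cell p.length x = cell p.length y) : lget p x = lget p y := by
  unfold lget
  rw [h]

-- a root is a stored value, hence nonnegative
lemma root_nonneg {p : List Int} {r : Int} (hp : RangeOK p) (hr : InR p r)
    (hroot : lget p r = r) : 0 ≤ r := by
  have := (hp _ (lget_mem hr)).1
  rw [hroot] at this
  exact this

-- ---- parent paths ----
-- UFPath p r x L: following parent pointers from x reaches the root r (lget p r = r),
-- visiting exactly the non-root nodes L (x included when x is not a root)
inductive UFPath (p : List Int) : Int → Int → List Int → Prop where
  | nil (r : Int) (h : lget p r = r) : UFPath p r r []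
  | cons (x r : Int) (L : List Int) (hx : lget p x ≠ x) (h : UFPath p r (lget p x) L) :
      UFPath p r x (x :: L)

lemma path_root {p : List Int} {r x : Int} {L : List Int} (h : UFPath p r x L) : lget p r = r := by
  induction h with
  | nil r h => exact h
  | cons x r L hx h ih => exact ih

lemma path_mem_not_root {p : List Int} {r x : Int} {L : List Int} (h : UFPath p r x L) :
    ∀ z ∈ L, lget p z ≠ z := by
  induction h with
  | nil r h => simp
  | cons x r L hx h ih =>
    intro z hz
    rcases List.mem_cons.mp hz with rfl | hz
    · exact hx
    · exact ih z hz

lemma path_unique {p : List Int} {r r' x : Int} {L L' : List Int}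
    (h : UFPath p r x L) (h' : UFPath p r' x L') : r = r' ∧ L = L' := by
  induction h generalizing r' L' with
  | nil r h => cases h' with
    | nil r h2 => exact ⟨rfl, rfl⟩
    | cons x r2 L2 hx h2 => exact absurd h hx
  | cons x r L hx h ih =>
    cases h' with
    | nil r h2 => exact absurd h2 hx
    | cons x r2 L2 hx2 h2 =>
      obtain ⟨h3, h4⟩ := ih h2
      exact ⟨h3, by rw [h4]⟩

lemma path_suffix {p : List Int} {r x : Int} {L : List Int} (h : UFPath p r x L) :
    ∀ z ∈ L, ∃ M, UFPath p r z M ∧ M.length ≤ L.length := by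
  induction h with
  | nil r h => simp
  | cons x r L hx h ih =>
    intro z hz
    rcases List.mem_cons.mp hz with rfl | hz
    · exact ⟨z :: L, UFPath.cons z r L hx h, le_refl _⟩
    · obtain ⟨M, hM, hlen⟩ := ih z hz
      exact ⟨M, hM, by simp; omega⟩

lemma path_cells_nodup {p : List Int} {r x : Int} {L : List Int} (h : UFPath p r x L) :
    (L.map (cell p.length)).Nodup := by
  induction h with
  | nil r h => simp
  | cons x r L hx h ih =>
    simp only [List.map_cons, List.nodup_cons]
    refine ⟨?_, ih⟩
    intro hmem
    obtain ⟨z, hz, hcz⟩ := List.mem_map.mp hmem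
    have hread : lget p z = lget p x := lget_cell_congr hcz
    obtain ⟨M, hM, hlen⟩ := path_suffix h z hz
    have hznr : lget p z ≠ z := path_mem_not_root h z hz
    cases hM with
    | nil s hs => exact hznr hs
    | cons _ _ _ hz2 hM' =>
      rw [hread] at hM'
      obtain ⟨-, hLM⟩ := path_unique h hM'
      rw [← hLM] at hlen
      simp at hlen

lemma path_root_cell_unique {p : List Int} {r x s : Int} {L : List Int}
    (h : UFPath p r x L) (hs : lget p s = s) {z : Int} (hz : z ∈ L)
    (hc : cell p.length z = cell p.length s) : r = s := by
  have hread : lget p z = lget p s := lget_cell_congr hc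
  obtain ⟨M, hM, -⟩ := path_suffix h z hz
  have hznr : lget p z ≠ z := path_mem_not_root h z hz
  cases hM with
  | nil s' hs' => exact absurd hs' hznr
  | cons _ _ _ hz2 hM' =>
    rw [hread, hs] at hM'
    cases hM' with
    | nil _ _ => rfl
    | cons _ _ _ hx2 _ => exact absurd hs hx2

lemma path_transfer {p p' : List Int} {r x : Int} {L : List Int}
    (h : UFPath p r x L) (hr : lget p' r = r)
    (hL : ∀ z ∈ L, lget p' z = lget p z) : UFPath p' r x L := by
  induction h with
  | nil r h => exact UFPath.nil r hr
  | cons x r L hx h ih =>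
    have hgx : lget p' x = lget p x := hL x (by simp)
    refine UFPath.cons x r L (by rw [hgx]; exact hx) ?_
    rw [hgx]
    exact ih hr (fun z hz => hL z (by simp [hz]))

lemma path_range {p : List Int} {r x : Int} {L : List Int}
    (hp : RangeOK p) (h : UFPath p r x L) (hx : InR p x) :
    InR p r ∧ ∀ z ∈ L, InR p z := by
  induction h with
  | nil r h => exact ⟨hx, by simp⟩
  | cons x r L hx2 h ih =>
    have hy : InR p (lget p x) := by
      have := hp _ (lget_mem hx)
      exact ⟨by omega, this.2⟩
    obtain ⟨h1, h2⟩ := ih hy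
    refine ⟨h1, ?_⟩
    intro z hz
    rcases List.mem_cons.mp hz with rfl | hz
    · exact hx
    · exact h2 z hz

-- all nodes along a path starting at a nonnegative in-range index are canonical
lemma path_nonneg {p : List Int} {r x : Int} {L : List Int}
    (hp : RangeOK p) (h : UFPath p r x L) (hx0 : 0 ≤ x) (hxlt : x < (p.length : Int)) :
    (∀ z ∈ L, 0 ≤ z ∧ z < (p.length : Int)) ∧ 0 ≤ r ∧ r < (p.length : Int) := by
  induction h with
  | nil r h => exact ⟨by simp, hx0, hxlt⟩
  | cons x r L hx2 h ih =>
    have hy := hp _ (lget_mem ⟨by omega, hxlt⟩)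
    obtain ⟨h1, h2⟩ := ih hy.1 hy.2
    refine ⟨?_, h2⟩
    intro z hz
    rcases List.mem_cons.mp hz with rfl | hz
    · exact ⟨hx0, hxlt⟩
    · exact h1 z hz

-- ---- batched writes describing the compressed state ----
def pWrites (p : List Int) (r : Int) : List Int → List Int
  | [] => p
  | z :: L => lset (pWrites p r L) z r

def xorFrom (q : List Int) : List Int → Int
  | [] => 0
  | z :: L => PySem.Int.bxor (lget q z) (xorFrom q L)

def qWrites (q : List Int) : List Int → List Int
  | [] => q
  | z :: L => lset (qWrites q L) z (PySem.Int.bxor (lget q z) (xorFrom q L))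

lemma pWrites_length (p : List Int) (r : Int) (L : List Int) :
    (pWrites p r L).length = p.length := by
  induction L with
  | nil => rfl
  | cons z L ih => simp [pWrites, lset_length, ih]

lemma qWrites_length (q : List Int) (L : List Int) : (qWrites q L).length = q.length := by
  induction L with
  | nil => rfl
  | cons z L ih => simp [qWrites, lset_length, ih]

lemma pWrites_frame {p : List Int} {r z : Int} {L : List Int}
    (h : ∀ w ∈ L, cell p.length w ≠ cell p.length z) :
    lget (pWrites p r L) z = lget p z := by
  induction L with
  | nil => rfl
  | cons w L ih =>
    rw [pWrites, lget_lset_ne, ih (fun a ha => h a (by simp [ha]))]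
    rw [pWrites_length]
    exact Ne.symm (h w (by simp))

lemma qWrites_frame {q : List Int} {z : Int} {L : List Int}
    (h : ∀ w ∈ L, cell q.length w ≠ cell q.length z) :
    lget (qWrites q L) z = lget q z := by
  induction L with
  | nil => rfl
  | cons w L ih =>
    rw [qWrites, lget_lset_ne, ih (fun a ha => h a (by simp [ha]))]
    rw [qWrites_length]
    exact Ne.symm (h w (by simp))

lemma pWrites_get_or (p : List Int) (r z : Int) (L : List Int) :
    lget (pWrites p r L) z = lget p z ∨ lget (pWrites p r L) z = r := by
  induction L with
  | nil => exact Or.inl rfl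
  | cons w L ih =>
    simp only [pWrites]
    rcases lget_lset_or (pWrites p r L) w z r with h | h
    · rw [h]
      exact ih
    · rw [h]
      exact Or.inr rfl

lemma xorFrom_frame {q : List Int} {i v : Int} {L : List Int}
    (h : ∀ w ∈ L, cell q.length w ≠ cell q.length i) :
    xorFrom (lset q i v) L = xorFrom q L := by
  induction L with
  | nil => rfl
  | cons w L ih =>
    rw [xorFrom, xorFrom, lget_lset_ne (h w (by simp)), ih (fun a ha => h a (by simp [ha]))]

lemma xorFrom_snoc (q : List Int) (L : List Int) (r : Int) :
    xorFrom q (L ++ [r]) = PySem.Int.bxor (xorFrom q L) (lget q r) := by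
  induction L with
  | nil => simp [xorFrom, PySem.Int.bxor_zero, zero_bxor]
  | cons z L ih => rw [List.cons_append, xorFrom, xorFrom, ih, bxor_assoc]

lemma mem_pWrites {p : List Int} {r a : Int} {L : List Int} (ha : a ∈ pWrites p r L) :
    a ∈ p ∨ a = r := by
  induction L with
  | nil => exact Or.inl ha
  | cons z L ih =>
    rcases List.mem_or_eq_of_mem_set ha with h | h
    · exact ih h
    · exact Or.inr h

-- ---- characterization of A's find ----
lemma findA_char {p q : List Int} {r x : Int} {L : List Int}
    (h : UFPath p r x L) (hq : q.length = p.length)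
    (hL : ∀ z ∈ L, InR p z) :
    ∀ F, L.length < F → findA F p q x = (r, xorFrom q L, pWrites p r L, qWrites q L) := by
  induction h with
  | nil r hr =>
    intro F hF
    obtain ⟨F, rfl⟩ : ∃ F', F = F' + 1 := ⟨F - 1, by omega⟩
    simp [findA, hr, pWrites, qWrites, xorFrom]
  | cons x r L hx h ih =>
    intro F hF
    obtain ⟨F, rfl⟩ : ∃ F', F = F' + 1 := ⟨F - 1, by omega⟩
    have hxI : InR p x := hL x (by simp)
    have hLI : ∀ z ∈ L, InR p z := fun z hz => hL z (by simp [hz])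
    have hnd := path_cells_nodup (UFPath.cons x r L hx h)
    simp only [List.map_cons, List.nodup_cons] at hnd
    have hfr : ∀ w ∈ L, cell p.length w ≠ cell p.length x := by
      intro w hw he
      exact hnd.1 (List.mem_map.mpr ⟨w, hw, he⟩)
    have hrec := ih hLI F (by simp only [List.length_cons] at hF; omega)
    simp only [findA, if_neg hx, hrec]
    have hq1 : lget (qWrites q L) x = lget q x := by
      refine qWrites_frame ?_
      rw [hq]
      exact hfr
    have hp2 : lget (lset (pWrites p r L) x r) x = r := by
      refine lget_lset_self rfl ?_ r
      rw [pWrites_length]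
      exact cell_lt hxI.1 hxI.2
    have hq2 : lget (lset (qWrites q L) x (PySem.Int.bxor (lget q x) (xorFrom q L))) x
        = PySem.Int.bxor (lget q x) (xorFrom q L) := by
      refine lget_lset_self rfl ?_ _
      rw [qWrites_length, hq]
      exact cell_lt hxI.1 hxI.2
    simp only [hq1, hp2, hq2]
    rfl

-- ---- the Good invariant (bounded paths from every in-range index) ----
def Good (b : Nat) (p : List Int) : Prop :=
  RangeOK p ∧ ∀ x : Int, InR p x → ∃ r L, UFPath p r x L ∧ L.length ≤ b

lemma good_mono {b b' : Nat} {p : List Int} (h : b ≤ b') (hg : Good b p) : Good b' p :=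
  ⟨hg.1, fun x hx => by obtain ⟨r, L, h1, h2⟩ := hg.2 x hx; exact ⟨r, L, h1, le_trans h2 h⟩⟩

lemma path_lift_writes {p : List Int} {r : Int} {L : List Int}
    (hroot : lget p r = r)
    {x' r' : Int} {L'' : List Int} (h : UFPath p r' x' L'') :
    ∃ r₂ M, UFPath (pWrites p r L) r₂ x' M ∧ M.length ≤ L''.length + 1 := by
  have hrp : lget (pWrites p r L) r = r := by
    rcases pWrites_get_or p r r L with h1 | h1 <;> rw [h1]
    exact hroot
  induction h with
  | nil s hs =>
    rcases pWrites_get_or p r s L with h1 | h1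
    · exact ⟨s, [], UFPath.nil s (by rw [h1]; exact hs), by simp⟩
    · by_cases hsr : r = s
      · exact ⟨s, [], UFPath.nil s (by rw [h1, hsr]), by simp⟩
      · refine ⟨r, [s], UFPath.cons s r [] (by rw [h1]; exact hsr) ?_, by simp⟩
        rw [h1]
        exact UFPath.nil r hrp
  | cons y s L1 hy hinner ih =>
    rcases pWrites_get_or p r y L with h1 | h1
    · obtain ⟨r₂, M, hM, hlen⟩ := ih
      refine ⟨r₂, y :: M, UFPath.cons y r₂ M ?_ ?_, by simp only [List.length_cons, List.length_nil]; omega⟩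
      · rw [h1]; exact hy
      · rw [h1]; exact hM
    · have hry : r ≠ y := by
        intro e
        rw [← e] at hy
        exact hy hroot
      refine ⟨r, [y], UFPath.cons y r [] (by rw [h1]; exact hry) ?_,
        by simp only [List.length_cons, List.length_nil]; omega⟩
      rw [h1]
      exact UFPath.nil r hrp

lemma good_after_writes {b : Nat} {p : List Int} {r x : Int} {L : List Int}
    (hg : Good b p) (hx : InR p x) (h : UFPath p r x L) :
    Good (b + 1) (pWrites p r L) := by
  have hroot := path_root h
  obtain ⟨hrI, hInL⟩ := path_range hg.1 h hx
  constructor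
  · intro v hv
    rw [pWrites_length]
    rcases mem_pWrites hv with h1 | rfl
    · exact hg.1 v h1
    · exact ⟨root_nonneg hg.1 hrI hroot, hrI.2⟩
  · intro x' hx'
    have hx'p : InR p x' := lenInR (by rw [pWrites_length]) hx'
    obtain ⟨r', L'', hpath, hlen⟩ := hg.2 x' hx'p
    obtain ⟨r₂, M, hM, hlen2⟩ := path_lift_writes hroot hpath
    exact ⟨r₂, M, hM, by omega⟩

lemma path_lift_link {p : List Int} {pu pv : Int}
    (hru : lget p pu = pu)
    {x' r' : Int} {L'' : List Int} (h : UFPath p r' x' L'') :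
    ∃ r₂ M, UFPath (lset p pv pu) r₂ x' M ∧ M.length ≤ L''.length + 1 := by
  have hpuR : lget (lset p pv pu) pu = pu := by
    rcases lget_lset_or p pv pu pu with h1 | h1 <;> rw [h1]
    exact hru
  induction h with
  | nil s hs =>
    rcases lget_lset_or p pv s pu with h1 | h1
    · exact ⟨s, [], UFPath.nil s (by rw [h1]; exact hs), by simp⟩
    · by_cases hsr : pu = s
      · exact ⟨s, [], UFPath.nil s (by rw [h1, hsr]), by simp⟩
      · refine ⟨pu, [s], UFPath.cons s pu [] (by rw [h1]; exact hsr) ?_, by simp⟩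
        rw [h1]
        exact UFPath.nil pu hpuR
  | cons y s L1 hy hinner ih =>
    rcases lget_lset_or p pv y pu with h1 | h1
    · obtain ⟨r₂, M, hM, hlen⟩ := ih
      refine ⟨r₂, y :: M, UFPath.cons y r₂ M ?_ ?_, by simp only [List.length_cons, List.length_nil]; omega⟩
      · rw [h1]; exact hy
      · rw [h1]; exact hM
    · have hry : pu ≠ y := by
        intro e
        rw [← e] at hy
        exact hy hru
      refine ⟨pu, [y], UFPath.cons y pu [] (by rw [h1]; exact hry) ?_,
        by simp only [List.length_cons, List.length_nil]; omega⟩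
      rw [h1]
      exact UFPath.nil pu hpuR

lemma good_after_link {b : Nat} {p : List Int} {pu pv : Int}
    (hg : Good b p) (hu : InR p pu) (hru : lget p pu = pu) :
    Good (b + 1) (lset p pv pu) := by
  constructor
  · intro a ha
    rw [lset_length]
    rcases List.mem_or_eq_of_mem_set ha with h1 | rfl
    · exact hg.1 a h1
    · exact ⟨root_nonneg hg.1 hu hru, hu.2⟩
  · intro x' hx'
    have hx'p : InR p x' := lenInR (by rw [lset_length]) hx'
    obtain ⟨r', L'', hpath, hlen⟩ := hg.2 x' hx'p
    obtain ⟨r₂, M, hM, hlen2⟩ := path_lift_link hru hpath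
    exact ⟨r₂, M, hM, by omega⟩

-- ---- resolution: the semantic (root, parity) of a node in A's lazy state ----
def Res (p q : List Int) (x r g : Int) : Prop :=
  ∃ L, UFPath p r x L ∧ xorFrom q L = g

lemma res_unique {p q : List Int} {x r g r' g' : Int}
    (h : Res p q x r g) (h' : Res p q x r' g') : r = r' ∧ g = g' := by
  obtain ⟨L, hL, hg⟩ := h
  obtain ⟨L', hL', hg'⟩ := h'
  obtain ⟨h1, h2⟩ := path_unique hL hL'
  subst h2
  exact ⟨h1, hg ▸ hg' ▸ rfl⟩

-- A-state invariant: the parity slot of every (canonical) root is 0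
def ZeroRoots (p q : List Int) : Prop :=
  ∀ j : Nat, j < p.length → lget p (j : Int) = (j : Int) → lget q (j : Int) = 0

-- value written by the compression at each node of the compressed path
lemma writes_val {p q : List Int} {r0 u : Int} {L0 : List Int}
    (h : UFPath p r0 u L0) (hq : q.length = p.length) (hI : ∀ z ∈ L0, InR p z) :
    ∀ z ∈ L0, ∃ S, UFPath p r0 z (z :: S) ∧
      lget (pWrites p r0 L0) z = r0 ∧
      lget (qWrites q L0) z = xorFrom q (z :: S) := by
  induction h with
  | nil r hr => simp
  | cons x r L hx h ih =>
    intro z hz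
    have hxI : InR p x := hI x (by simp)
    have hLI : ∀ a ∈ L, InR p a := fun a ha => hI a (by simp [ha])
    have hnd := path_cells_nodup (UFPath.cons x r L hx h)
    simp only [List.map_cons, List.nodup_cons] at hnd
    have hfr : ∀ a ∈ L, cell p.length a ≠ cell p.length x := by
      intro a ha he
      exact hnd.1 (List.mem_map.mpr ⟨a, ha, he⟩)
    rcases List.mem_cons.mp hz with rfl | hz
    · refine ⟨L, UFPath.cons z r L hx h, ?_, ?_⟩
      · show lget (lset (pWrites p r L) z r) z = r
        refine lget_lset_self rfl ?_ r
        rw [pWrites_length]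
        exact cell_lt hxI.1 hxI.2
      · show lget (lset (qWrites q L) z (PySem.Int.bxor (lget q z) (xorFrom q L))) z = _
        rw [lget_lset_self rfl (by rw [qWrites_length, hq]; exact cell_lt hxI.1 hxI.2)]
        rfl
    · obtain ⟨S, hS, hpv, hqv⟩ := ih hLI z hz
      have hzx : cell p.length z ≠ cell p.length x := hfr z hz
      refine ⟨S, hS, ?_, ?_⟩
      · show lget (lset (pWrites p r L) x r) z = r
        rw [lget_lset_ne (by rw [pWrites_length]; exact hzx)]
        exact hpv
      · show lget (lset (qWrites q L) x (PySem.Int.bxor (lget q x) (xorFrom q L))) z = _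
        rw [lget_lset_ne (by rw [qWrites_length, hq]; exact hzx)]
        exact hqv

-- compression never unroots a root
lemma root_preserved_writes {p : List Int} {r0 u s : Int} {L0 : List Int}
    (h : UFPath p r0 u L0) (hs : lget p s = s) : lget (pWrites p r0 L0) s = s := by
  by_cases hc : ∃ z ∈ L0, cell p.length z = cell p.length s
  · obtain ⟨z, hz, hcz⟩ := hc
    have hr0s : r0 = s := path_root_cell_unique h hs hz hcz
    rcases pWrites_get_or p r0 s L0 with h1 | h1
    · rw [h1]; exact hs
    · rw [h1, hr0s]
  · push_neg at hc
    rw [pWrites_frame hc]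
    exact hs

-- compression preserves every node's semantic (root, parity)
lemma res_writes {p q : List Int} {r0 u : Int} {L0 : List Int}
    (h0 : UFPath p r0 u L0) (hq : q.length = p.length) (hI : ∀ z ∈ L0, InR p z)
    {x r g : Int} (h : Res p q x r g) :
    Res (pWrites p r0 L0) (qWrites q L0) x r g := by
  obtain ⟨L, hL, rfl⟩ := h
  induction hL with
  | nil s hs =>
    exact ⟨[], UFPath.nil s (root_preserved_writes h0 hs), rfl⟩
  | cons x r L hx hinner ih =>
    by_cases hc : ∃ z ∈ L0, cell p.length z = cell p.length x
    · obtain ⟨z, hz, hcz⟩ := hc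
      obtain ⟨S, hzS, hpv, hqv⟩ := writes_val h0 hq hI z hz
      have hread : lget p z = lget p x := lget_cell_congr hcz
      cases hzS with
      | cons _ _ _ hz2 hS =>
        rw [hread] at hS
        obtain ⟨hre, hLe⟩ := path_unique hinner hS
        have hrx : r ≠ x := by
          intro e
          rw [← e] at hx
          exact hx (path_root hinner)
        have hpx : lget (pWrites p r0 L0) x = r0 := by
          rw [lget_cell_congr (show cell (pWrites p r0 L0).length x = cell (pWrites p r0 L0).length z by
            rw [pWrites_length]; exact hcz.symm)]
          exact hpv
        have hqx : lget (qWrites q L0) x = xorFrom q (z :: S) := by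
          rw [lget_cell_congr (show cell (qWrites q L0).length x = cell (qWrites q L0).length z by
            rw [qWrites_length, hq]; exact hcz.symm)]
          exact hqv
        refine ⟨[x], UFPath.cons x r [] (by rw [hpx, ← hre]; exact hrx) ?_, ?_⟩
        · have hxr2 : lget (pWrites p r0 L0) x = r := by rw [hpx]; exact hre.symm
          rw [hxr2]
          exact UFPath.nil r (root_preserved_writes h0 (path_root hinner))
        · show PySem.Int.bxor (lget (qWrites q L0) x) (xorFrom (qWrites q L0) []) = _
          rw [hqx]
          show PySem.Int.bxor (xorFrom q (z :: S)) 0 = _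
          rw [PySem.Int.bxor_zero]
          show PySem.Int.bxor (lget q z) (xorFrom q S) = _
          have hqzx : lget q z = lget q x :=
            lget_cell_congr (show cell q.length z = cell q.length x by rw [hq]; exact hcz)
          rw [hqzx, ← hLe]
          rfl
    · push_neg at hc
      have hpx : lget (pWrites p r0 L0) x = lget p x := pWrites_frame hc
      have hqx : lget (qWrites q L0) x = lget q x := qWrites_frame (by rw [hq]; exact hc)
      obtain ⟨L1', hL1', hx1'⟩ := ih
      refine ⟨x :: L1', UFPath.cons x r L1' (by rw [hpx]; exact hx) (by rw [hpx]; exact hL1'), ?_⟩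
      show PySem.Int.bxor (lget (qWrites q L0) x) (xorFrom (qWrites q L0) L1') = _
      rw [hqx, hx1']
      rfl

lemma zeroroots_writes {p q : List Int} {r0 u : Int} {L0 : List Int}
    (h0 : UFPath p r0 u L0) (hq : q.length = p.length) (hI : ∀ z ∈ L0, InR p z)
    (hz : ZeroRoots p q) : ZeroRoots (pWrites p r0 L0) (qWrites q L0) := by
  intro j hj hroot
  rw [pWrites_length] at hj
  by_cases hc : ∃ z ∈ L0, cell p.length z = cell p.length (j : Int)
  · obtain ⟨z, hz0, hcz⟩ := hc
    obtain ⟨S, hzS, hpv, hqv⟩ := writes_val h0 hq hI z hz0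
    have hpj : lget (pWrites p r0 L0) (j : Int) = r0 := by
      rw [lget_cell_congr (show cell (pWrites p r0 L0).length (j : Int) = cell (pWrites p r0 L0).length z by
        rw [pWrites_length]; exact hcz.symm)]
      exact hpv
    have hr0j : r0 = (j : Int) := by rw [← hpj, hroot]
    have hrootp : lget p (j : Int) = (j : Int) := by
      have := path_root hzS
      rw [hr0j] at this
      exact this
    have hq0 : lget q (j : Int) = 0 := hz j hj hrootp
    have hreadz : lget p z = lget p (j : Int) := lget_cell_congr hcz
    have hS0 : S = [] := by
      cases hzS with
      | cons _ _ _ hz2 hS =>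
        rw [hreadz, hrootp, ← hr0j] at hS
        exact (path_unique hS (UFPath.nil r0 (by rw [hr0j]; exact hrootp))).2
    have hqz : lget q z = lget q (j : Int) :=
      lget_cell_congr (show cell q.length z = cell q.length (j : Int) by rw [hq]; exact hcz)
    rw [lget_cell_congr (show cell (qWrites q L0).length (j : Int) = cell (qWrites q L0).length z by
      rw [qWrites_length, hq]; exact hcz.symm), hqv, hS0]
    show PySem.Int.bxor (lget q z) 0 = 0
    rw [hqz, hq0]
    rfl
  · push_neg at hc
    rw [qWrites_frame (by rw [hq]; exact hc)]
    rw [pWrites_frame hc] at hroot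
    exact hz j hj hroot

-- appending the link step to a path
lemma path_link {p p2 : List Int} {r s : Int}
    (hr : lget p2 r = s) (hsr : s ≠ r) (hs : lget p2 s = s) :
    ∀ (L : List Int) (x : Int), UFPath p r x L → (∀ z ∈ L, lget p2 z = lget p z) →
    UFPath p2 s x (L ++ [r]) := by
  intro L
  induction L with
  | nil =>
    intro x h hreads
    cases h with
    | nil _ h2 =>
      refine UFPath.cons r s [] (by rw [hr]; exact hsr) ?_
      rw [hr]
      exact UFPath.nil s hs
  | cons a L ih =>
    intro x h hreads
    cases h with
    | cons _ _ _ hx hin =>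
      have hgx : lget p2 a = lget p a := hreads a (by simp)
      refine UFPath.cons a s (L ++ [r]) (by rw [hgx]; exact hx) ?_
      rw [hgx]
      exact ih _ hin (fun z hz => hreads z (by simp [hz]))

-- linking root pv under root pu with parity d: every node's resolution updates pointwise
lemma res_link {p q : List Int} (hq : q.length = p.length) (hrk : RangeOK p)
    {pu pv d : Int} (hpuR : lget p pu = pu) (hpu0 : 0 ≤ pu)
    (hpv0 : 0 ≤ pv) (hpvlt : pv < (p.length : Int)) (hpvR : lget p pv = pv) (hne : pu ≠ pv)
    {j rj gj : Int} (hj0 : 0 ≤ j) (hjlt : j < (p.length : Int)) (hres : Res p q j rj gj) :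
    Res (lset p pv pu) (lset q pv d) j
      (if rj = pv then pu else rj)
      (if rj = pv then PySem.Int.bxor gj d else gj) := by
  obtain ⟨L, hL, rfl⟩ := hres
  obtain ⟨hzL, hr0, hrlt⟩ := path_nonneg hrk hL hj0 hjlt
  have hLne : ∀ z ∈ L, z ≠ pv := by
    intro z hz e
    exact path_mem_not_root hL z hz (by rw [e]; exact hpvR)
  have hreads : ∀ z ∈ L, lget (lset p pv pu) z = lget p z := by
    intro z hz
    exact lget_lset_ne (cell_ne_of_canon (hzL z hz).1 hpv0 (hLne z hz)) pu
  have hqcells : ∀ z ∈ L, cell q.length z ≠ cell q.length pv := by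
    intro z hz
    rw [hq]
    exact cell_ne_of_canon (hzL z hz).1 hpv0 (hLne z hz)
  have hxf : xorFrom (lset q pv d) L = xorFrom q L := xorFrom_frame hqcells
  by_cases hrj : rj = pv
  · subst hrj
    rw [if_pos rfl, if_pos rfl]
    have hp2pv : lget (lset p rj pu) rj = pu :=
      lget_lset_self rfl (cell_lt (by omega) hpvlt) pu
    have hp2pu : lget (lset p rj pu) pu = pu := by
      rw [lget_lset_ne (cell_ne_of_canon hpu0 hpv0 hne)]
      exact hpuR
    refine ⟨L ++ [rj], path_link hp2pv hne hp2pu L _ hL hreads, ?_⟩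
    rw [xorFrom_snoc, hxf]
    congr 1
    exact lget_lset_self rfl (by rw [hq]; exact cell_lt (by omega) hpvlt) d
  · rw [if_neg hrj, if_neg hrj]
    have hroot2 : lget (lset p pv pu) rj = rj := by
      rw [lget_lset_ne (cell_ne_of_canon hr0 hpv0 hrj)]
      exact path_root hL
    exact ⟨L, path_transfer hL hroot2 hreads, hxf⟩

lemma zeroroots_link {p q : List Int} (hq : q.length = p.length)
    {pu pv d : Int} (hpv0 : 0 ≤ pv) (hne : pu ≠ pv) (hz : ZeroRoots p q) :
    ZeroRoots (lset p pv pu) (lset q pv d) := by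
  intro j hj hroot
  rw [lset_length] at hj
  by_cases hjpv : (j : Int) = pv
  · exfalso
    rw [hjpv] at hroot
    rw [lget_lset_self rfl (cell_lt (by omega) (by rw [← hjpv]; exact_mod_cast hj)) pu] at hroot
    exact hne hroot
  · have hc : cell p.length (j : Int) ≠ cell p.length pv :=
      cell_ne_of_canon (by positivity) hpv0 hjpv
    rw [lget_lset_ne hc] at hroot
    rw [lget_lset_ne (by rw [hq]; exact hc)]
    exact hz j hj hroot

-- a node and its canonical index resolve identically (ZeroRoots covers the
-- stale-parity read A makes on a negative alias of a root)
lemma res_alias {p q : List Int} (hrk : RangeOK p) (hz : ZeroRoots p q)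
    (hq : q.length = p.length) {x : Int} (hx : InR p x) {r g : Int}
    (h : Res p q ((cell p.length x : Nat) : Int) r g) : Res p q x r g := by
  by_cases hxj : x = ((cell p.length x : Nat) : Int)
  · rwa [hxj]
  have hclt : cell p.length x < p.length := cell_lt hx.1 hx.2
  have hcc : cell p.length ((cell p.length x : Nat) : Int) = cell p.length x :=
    cell_natCast p.length (cell p.length x)
  have hread : lget p x = lget p ((cell p.length x : Nat) : Int) :=
    (lget_cell_congr hcc).symm
  have hreadq : lget q x = lget q ((cell p.length x : Nat) : Int) := by
    refine (lget_cell_congr ?_).symm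
    rw [hq]
    exact hcc
  obtain ⟨L, hL, rfl⟩ := h
  cases hL with
  | nil _ hroot =>
    refine ⟨[x], UFPath.cons x _ [] ?_ ?_, ?_⟩
    · rw [hread, hroot]
      exact Ne.symm hxj
    · rw [hread, hroot]
      exact UFPath.nil _ hroot
    · show PySem.Int.bxor (lget q x) 0 = 0
      rw [PySem.Int.bxor_zero, hreadq]
      exact hz (cell p.length x) hclt hroot
  | cons _ _ L1 hxj2 hinner =>
    refine ⟨x :: L1, UFPath.cons x r L1 ?_ ?_, ?_⟩
    · intro e
      have hmem : lget p x ∈ p := lget_mem hx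
      have h0 : 0 ≤ lget p x := (hrk _ hmem).1
      apply hxj
      rw [← e]
      unfold cell
      rw [if_neg (by omega)]
      rw [← e] at hx
      omega
    · rw [hread]
      exact hinner
    · show PySem.Int.bxor (lget q x) (xorFrom q L1) = _
      rw [hreadq]
      rfl

-- ---- characterization of B's relabeling scan ----
lemma relabel_spec (cv cu d : Int) : ∀ (is : List Nat) (comp par : List Int),
    comp.length = par.length → is.Nodup → (∀ i ∈ is, i < comp.length) →
    (relabelB cv cu d is (comp, par)).1.length = comp.length ∧
    (relabelB cv cu d is (comp, par)).2.length = par.length ∧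
    ∀ j : Nat, j < comp.length →
      lget (relabelB cv cu d is (comp, par)).1 (j : Int) =
        (if j ∈ is ∧ lget comp (j : Int) = cv then cu else lget comp (j : Int)) ∧
      lget (relabelB cv cu d is (comp, par)).2 (j : Int) =
        (if j ∈ is ∧ lget comp (j : Int) = cv then PySem.Int.bxor (lget par (j : Int)) d
         else lget par (j : Int)) := by
  intro is
  induction is with
  | nil =>
    intro comp par hlen hnd hb
    refine ⟨rfl, rfl, ?_⟩
    intro j hj
    simp [relabelB]
  | cons i is ih =>
    intro comp par hlen hnd hb
    have hilt : i < comp.length := hb i (by simp)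
    have hci : cell comp.length (i : Int) = i := cell_natCast _ i
    have hnd' : is.Nodup := (List.nodup_cons.mp hnd).2
    have hni : i ∉ is := (List.nodup_cons.mp hnd).1
    by_cases hc : lget comp (i : Int) = cv
    · have hstep : relabelB cv cu d (i :: is) (comp, par)
          = relabelB cv cu d is
            (lset comp (i : Int) cu, lset par (i : Int) (PySem.Int.bxor (lget par (i : Int)) d)) := by
        simp [relabelB, hc]
      obtain ⟨hl1, hl2, hpt⟩ := ih (lset comp (i : Int) cu)
        (lset par (i : Int) (PySem.Int.bxor (lget par (i : Int)) d))
        (by rw [lset_length, lset_length]; exact hlen)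
        hnd'
        (by intro a ha; rw [lset_length]; exact hb a (by simp [ha]))
      rw [lset_length] at hl1 hl2
      refine ⟨by rw [hstep, hl1], by rw [hstep, hl2], ?_⟩
      intro j hj
      have hjlt' : j < (lset comp (i : Int) cu).length := by rw [lset_length]; exact hj
      obtain ⟨e1, e2⟩ := hpt j hjlt'
      rw [hstep]
      by_cases hji : j = i
      · subst hji
        have hri : lget (lset comp (j : Int) cu) (j : Int) = cu :=
          lget_lset_self rfl (by rw [hci]; exact hilt) cu
        have hrpi : lget (lset par (j : Int) (PySem.Int.bxor (lget par (j : Int)) d)) (j : Int)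
            = PySem.Int.bxor (lget par (j : Int)) d :=
          lget_lset_self rfl (by rw [cell_natCast, ← hlen]; exact hilt) _
        constructor
        · rw [e1, if_neg (fun h => hni h.1), hri, if_pos ⟨by simp, hc⟩]
        · rw [e2, if_neg (fun h => hni h.1), hrpi, if_pos ⟨by simp, hc⟩]
      · have hcne : cell comp.length (j : Int) ≠ cell comp.length (i : Int) := by
          rw [hci, cell_natCast]
          exact fun e => hji e
        have hrj : lget (lset comp (i : Int) cu) (j : Int) = lget comp (j : Int) :=
          lget_lset_ne hcne cu
        have hrpj : lget (lset par (i : Int) (PySem.Int.bxor (lget par (i : Int)) d)) (j : Int)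
            = lget par (j : Int) :=
          lget_lset_ne (by rw [← hlen]; exact hcne) _
        have hmem : (j ∈ i :: is ∧ lget comp (j : Int) = cv) ↔
            (j ∈ is ∧ lget comp (j : Int) = cv) := by
          simp [List.mem_cons, hji]
        constructor
        · rw [e1, hrj]
          exact (if_congr hmem rfl rfl).symm
        · rw [e2, hrj, hrpj]
          exact (if_congr hmem rfl rfl).symm
    · have hstep : relabelB cv cu d (i :: is) (comp, par) = relabelB cv cu d is (comp, par) := by
        simp [relabelB, hc]
      obtain ⟨hl1, hl2, hpt⟩ := ih comp par hlen hnd'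
        (fun a ha => hb a (by simp [ha]))
      refine ⟨by rw [hstep, hl1], by rw [hstep, hl2], ?_⟩
      intro j hj
      obtain ⟨e1, e2⟩ := hpt j hj
      by_cases hji : j = i
      · subst hji
        constructor
        · rw [hstep, e1, if_neg (fun h => hni h.1), if_neg (fun h => hc h.2)]
        · rw [hstep, e2, if_neg (fun h => hni h.1), if_neg (fun h => hc h.2)]
      · have hmem : (j ∈ i :: is ∧ lget comp (j : Int) = cv) ↔
            (j ∈ is ∧ lget comp (j : Int) = cv) := by
          simp [List.mem_cons, hji]
        constructor
        · rw [hstep, e1]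
          exact (if_congr hmem rfl rfl).symm
        · rw [hstep, e2]
          exact (if_congr hmem rfl rfl).symm

-- ---- the simulation invariant between A's forest and B's labels ----
def SimInv (b : Nat) (p q comp par : List Int) : Prop :=
  q.length = p.length ∧ comp.length = p.length ∧ par.length = p.length ∧
  Good b p ∧ ZeroRoots p q ∧
  ∀ j : Nat, j < p.length → Res p q (j : Int) (lget comp (j : Int)) (lget par (j : Int))

lemma res_read {b : Nat} {p q comp par : List Int} (hSI : SimInv b p q comp par)
    {x : Int} (hx : InR p x) : Res p q x (lget comp x) (lget par x) := by
  obtain ⟨hq, hcl, hpl, hg, hz, hres⟩ := hSI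
  have hclt : cell p.length x < p.length := cell_lt hx.1 hx.2
  have h1 : Res p q ((cell p.length x : Nat) : Int)
      (lget comp ((cell p.length x : Nat) : Int)) (lget par ((cell p.length x : Nat) : Int)) :=
    hres (cell p.length x) hclt
  have h2 : lget comp x = lget comp ((cell p.length x : Nat) : Int) := by
    refine lget_cell_congr ?_
    rw [hcl, cell_natCast]
  have h3 : lget par x = lget par ((cell p.length x : Nat) : Int) := by
    refine lget_cell_congr ?_
    rw [hpl, cell_natCast]
  rw [h2, h3]
  exact res_alias hg.1 hz hq hx h1

lemma inv_writes {b : Nat} {p q comp par : List Int} (hSI : SimInv b p q comp par)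
    {u r : Int} {L : List Int} (hu : InR p u) (hpath : UFPath p r u L) :
    SimInv (b + 1) (pWrites p r L) (qWrites q L) comp par := by
  obtain ⟨hq, hcl, hpl, hg, hz, hres⟩ := hSI
  have hI : ∀ z ∈ L, InR p z := (path_range hg.1 hpath hu).2
  refine ⟨by rw [qWrites_length, pWrites_length]; exact hq,
    by rw [pWrites_length]; exact hcl,
    by rw [pWrites_length]; exact hpl,
    good_after_writes hg hu hpath,
    zeroroots_writes hpath hq hI hz, ?_⟩
  intro j hj
  rw [pWrites_length] at hj
  exact res_writes hpath hq hI (hres j hj)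

lemma findA_res {b F : Nat} {p q comp par : List Int} (hSI : SimInv b p q comp par)
    {u : Int} (hu : InR p u) (hF : b < F) :
    ∃ L, UFPath p (lget comp u) u L ∧
      findA F p q u = (lget comp u, lget par u, pWrites p (lget comp u) L, qWrites q L) := by
  have hr := res_read hSI hu
  obtain ⟨hq, hcl, hpl, hg, hz, hres⟩ := hSI
  obtain ⟨r, L, hL, hlen⟩ := hg.2 u hu
  have hI : ∀ z ∈ L, InR p z := (path_range hg.1 hL hu).2
  obtain ⟨h1, h2⟩ := res_unique ⟨L, hL, rfl⟩ hr
  refine ⟨L, by rw [← h1]; exact hL, ?_⟩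
  rw [← h1, ← h2]
  exact findA_char hL hq hI F (by omega)

lemma inv_link {b : Nat} {p q comp par comp' par' : List Int}
    (hSI : SimInv b p q comp par)
    {cu cv d : Int}
    (hcuR : lget p cu = cu) (hcu0 : 0 ≤ cu) (hcult : cu < (p.length : Int))
    (hcvR : lget p cv = cv) (hcv0 : 0 ≤ cv) (hcvlt : cv < (p.length : Int))
    (hne : cu ≠ cv)
    (hlen1 : comp'.length = comp.length) (hlen2 : par'.length = par.length)
    (hpt : ∀ j : Nat, j < p.length →
      lget comp' (j : Int) = (if lget comp (j : Int) = cv then cu else lget comp (j : Int)) ∧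
      lget par' (j : Int) = (if lget comp (j : Int) = cv then PySem.Int.bxor (lget par (j : Int)) d
        else lget par (j : Int))) :
    SimInv (b + 1) (lset p cv cu) (lset q cv d) comp' par' := by
  obtain ⟨hq, hcl, hpl, hg, hz, hres⟩ := hSI
  have hcuI : InR p cu := ⟨by omega, hcult⟩
  refine ⟨by rw [lset_length, lset_length]; exact hq,
    by rw [lset_length, hlen1]; exact hcl,
    by rw [lset_length, hlen2]; exact hpl,
    good_after_link hg hcuI hcuR,
    zeroroots_link hq hcv0 hne hz, ?_⟩
  intro j hj
  rw [lset_length] at hj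
  obtain ⟨e1, e2⟩ := hpt j hj
  rw [e1, e2]
  exact res_link (d := d) hq hg.1 hcuR hcu0 hcv0 hcvlt hcvR hne
    (j := (j : Int)) (by positivity) (by exact_mod_cast hj) (hres j hj)

lemma siminv_mono {b b' : Nat} {p q comp par : List Int} (h : b ≤ b')
    (hSI : SimInv b p q comp par) : SimInv b' p q comp par :=
  ⟨hSI.1, hSI.2.1, hSI.2.2.1, good_mono h hSI.2.2.2.1, hSI.2.2.2.2.1, hSI.2.2.2.2.2⟩

lemma lget_replicate0 (N : Nat) (x : Int) : lget (List.replicate N (0 : Int)) x = 0 := by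
  unfold lget
  rw [List.getD_eq_getElem?_getD]
  simp only [List.getElem?_replicate]
  split <;> rfl

-- the two edge loops agree under the invariant
lemma loop_eq {F : Nat} : ∀ (rest : List (List Int)) (p q comp par sz : List Int) (c : Int) (b : Nat),
    SimInv b p q comp par →
    (∀ e ∈ rest, InR p (e.getD 0 0) ∧ InR p (e.getD 1 0)) →
    b + 3 * rest.length < F →
    loopB p.length rest comp par sz c = loopA F rest p q sz c := by
  intro rest
  induction rest with
  | nil => intro p q comp par sz c b hSI hE hF; rfl
  | cons e rest ih =>
    intro p q comp par sz c b hSI hE hF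
    simp only [List.length_cons] at hF
    obtain ⟨hu, hv⟩ := hE e (by simp)
    -- A's first find returns B's stored label and parity of u
    obtain ⟨Lu, hpu, hAu⟩ := findA_res (F := F) (b := b) hSI hu (by omega)
    have hSI1 := inv_writes hSI hu hpu
    have hlp1 : (pWrites p (lget comp (e.getD 0 0)) Lu).length = p.length := pWrites_length _ _ _
    have hv1 : InR (pWrites p (lget comp (e.getD 0 0)) Lu) (e.getD 1 0) :=
      lenInR (by rw [hlp1]) hv
    -- A's second find likewise for v
    obtain ⟨Lv, hpv, hAv⟩ := findA_res (F := F) (b := b + 1) hSI1 hv1 (by omega)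
    have hSI2 := inv_writes hSI1 hv1 hpv
    simp only [loopA, loopB, unionA, hAu, hAv]
    set ru := lget comp (e.getD 0 0) with hru
    set rv := lget comp (e.getD 1 0) with hrv
    set gu := lget par (e.getD 0 0) with hgu
    set gv := lget par (e.getD 1 0) with hgv
    set p1 := pWrites p ru Lu with hp1
    set q1 := qWrites q Lu with hq1d
    set p2 := pWrites p1 rv Lv with hp2
    set q2 := qWrites q1 Lv with hq2d
    have hlp2 : p2.length = p.length := by
      rw [hp2, pWrites_length, hlp1]
    have hE' : ∀ e' ∈ rest, InR p2 (e'.getD 0 0) ∧ InR p2 (e'.getD 1 0) := by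
      intro e' he'
      exact ⟨lenInR hlp2.symm (hE e' (by simp [he'])).1, lenInR hlp2.symm (hE e' (by simp [he'])).2⟩
    -- roots and bounds
    have hruRp : lget p ru = ru := path_root hpu
    have hruR1 : lget p1 ru = ru := root_preserved_writes hpu hruRp
    have hruR2 : lget p2 ru = ru := root_preserved_writes hpv hruR1
    have hrvR1 : lget p1 rv = rv := path_root hpv
    have hrvR2 : lget p2 rv = rv := root_preserved_writes hpv hrvR1
    have hruI : InR p ru := (path_range hSI.2.2.2.1.1 hpu hu).1
    have hru0 : 0 ≤ ru := root_nonneg hSI.2.2.2.1.1 hruI hruRp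
    have hrvI1 : InR p1 rv := (path_range hSI1.2.2.2.1.1 hpv hv1).1
    have hrv0 : 0 ≤ rv := root_nonneg hSI1.2.2.2.1.1 hrvI1 hrvR1
    have hrult : ru < (p2.length : Int) := by rw [hlp2]; exact hruI.2
    have hrvlt : rv < (p2.length : Int) := by rw [hlp2, ← hlp1]; exact hrvI1.2
    by_cases hcc : ru = rv
    · simp only [if_pos hcc]
      have hcnt : (if (decide (PySem.Int.bxor gu gv = (e.getD 2 0)) : Bool) then c + 1 else c)
          = (if PySem.Int.bxor gu gv = (e.getD 2 0) then c + 1 else c) := by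
        by_cases hX : PySem.Int.bxor gu gv = (e.getD 2 0) <;> simp [hX]
      rw [hcnt]
      have := ih p2 q2 comp par sz (if PySem.Int.bxor gu gv = (e.getD 2 0) then c + 1 else c)
        (b + 3) (siminv_mono (by omega) hSI2) hE' (by omega)
      rw [hlp2] at this
      exact this
    · simp only [if_neg hcc]
      by_cases hsz : lget sz ru < lget sz rv
      · simp only [if_pos hsz]
        rcases hrel : relabelB ru rv (PySem.Int.bxor (PySem.Int.bxor gv gu) (e.getD 2 0))
            (List.range p.length) (comp, par) with ⟨comp', par'⟩
        obtain ⟨hl1, hl2, hpt⟩ := relabel_spec ru rv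
          (PySem.Int.bxor (PySem.Int.bxor gv gu) (e.getD 2 0)) (List.range p.length) comp par
          (by rw [hSI.2.1, hSI.2.2.1]) (List.nodup_range) (by intro a ha; rw [hSI.2.1]; exact List.mem_range.mp ha)
        rw [hrel] at hl1 hl2 hpt
        have hSI3 := inv_link hSI2 (cu := rv) (cv := ru)
          (d := PySem.Int.bxor (PySem.Int.bxor gv gu) (e.getD 2 0))
          hrvR2 hrv0 hrvlt hruR2 hru0 hrult (Ne.symm hcc)
          (comp' := comp') (par' := par') (by rw [hl1]) (by rw [hl2])
          (by
            intro j hj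
            rw [hlp2] at hj
            have := hpt j (by rw [hSI.2.1]; exact hj)
            simpa [List.mem_range.mpr hj, hj] using this)
        have hE'' : ∀ e' ∈ rest, InR (lset p2 ru rv) (e'.getD 0 0) ∧ InR (lset p2 ru rv) (e'.getD 1 0) := by
          intro e' he'
          exact ⟨lenInR (by rw [lset_length, hlp2]) (hE e' (by simp [he'])).1,
            lenInR (by rw [lset_length, hlp2]) (hE e' (by simp [he'])).2⟩
        have := ih (lset p2 ru rv) (lset q2 ru (PySem.Int.bxor (PySem.Int.bxor gv gu) (e.getD 2 0)))
          comp' par' (lset sz rv (lget sz rv + lget sz ru)) (c + 1) (b + 3) hSI3 hE'' (by omega)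
        rw [lset_length, hlp2] at this
        simp only [if_true]
        rw [← this]
      · simp only [if_neg hsz]
        rcases hrel : relabelB rv ru (PySem.Int.bxor (PySem.Int.bxor gu gv) (e.getD 2 0))
            (List.range p.length) (comp, par) with ⟨comp', par'⟩
        obtain ⟨hl1, hl2, hpt⟩ := relabel_spec rv ru
          (PySem.Int.bxor (PySem.Int.bxor gu gv) (e.getD 2 0)) (List.range p.length) comp par
          (by rw [hSI.2.1, hSI.2.2.1]) (List.nodup_range) (by intro a ha; rw [hSI.2.1]; exact List.mem_range.mp ha)
        rw [hrel] at hl1 hl2 hpt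
        have hSI3 := inv_link hSI2 (cu := ru) (cv := rv)
          (d := PySem.Int.bxor (PySem.Int.bxor gu gv) (e.getD 2 0))
          hruR2 hru0 hrult hrvR2 hrv0 hrvlt hcc
          (comp' := comp') (par' := par') (by rw [hl1]) (by rw [hl2])
          (by
            intro j hj
            rw [hlp2] at hj
            have := hpt j (by rw [hSI.2.1]; exact hj)
            simpa [List.mem_range.mpr hj, hj] using this)
        have hE'' : ∀ e' ∈ rest, InR (lset p2 rv ru) (e'.getD 0 0) ∧ InR (lset p2 rv ru) (e'.getD 1 0) := by
          intro e' he'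
          exact ⟨lenInR (by rw [lset_length, hlp2]) (hE e' (by simp [he'])).1,
            lenInR (by rw [lset_length, hlp2]) (hE e' (by simp [he'])).2⟩
        have := ih (lset p2 rv ru) (lset q2 rv (PySem.Int.bxor (PySem.Int.bxor gu gv) (e.getD 2 0)))
          comp' par' (lset sz ru (lget sz ru + lget sz rv)) (c + 1) (b + 3) hSI3 hE'' (by omega)
        rw [lset_length, hlp2] at this
        simp only [if_true]
        rw [← this]

-- ===== VERDICT (by name: the statement is the Claim_ definition above) =====
theorem numberOfEdgesAdded_spec : Claim_equal_numberOfEdgesAdded := by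
  intro n edges hdom hpre
  obtain ⟨hn0, hE⟩ := hpre
  cases edges with
  | nil => rfl
  | cons e0 rest0 =>
    have hn : 0 ≤ n := by
      rcases hn0 with h | h
      · exact h
      · simp at h
    unfold Spec_numberOfEdgesAdded numberOfEdgesAdded numberOfEdgesAdded_alt
    have hlen : ((List.range n.toNat).map (fun (i : Nat) => (i : Int))).length = n.toNat := by
      simp
    have hread : ∀ x : Int, InR ((List.range n.toNat).map (fun (i : Nat) => (i : Int))) x →
        lget ((List.range n.toNat).map (fun (i : Nat) => (i : Int))) x
          = (cell n.toNat x : Int) := by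
      intro x hx
      obtain ⟨hx0, hx1⟩ := hx
      rw [hlen] at hx0 hx1
      have hxl : cell ((List.range n.toNat).map (fun (i : Nat) => (i : Int))).length x
          < ((List.range n.toNat).map (fun (i : Nat) => (i : Int))).length := by
        rw [hlen]
        exact cell_lt hx0 hx1
      unfold lget
      rw [List.getD_eq_getElem?_getD, List.getElem?_eq_getElem hxl]
      simp only [Option.getD_some, List.getElem_map, List.getElem_range]
      rw [hlen]
    have hgood : Good 1 ((List.range n.toNat).map (fun (i : Nat) => (i : Int))) := by
      constructor
      · intro val hval
        rw [hlen]
        simp only [List.mem_map, List.mem_range] at hval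
        obtain ⟨i, hi, rfl⟩ := hval
        constructor
        · exact Int.natCast_nonneg i
        · exact_mod_cast hi
      · intro x hx
        have hg := hread x hx
        obtain ⟨hx0, hx1⟩ := hx
        rw [hlen] at hx0 hx1
        by_cases hxn : 0 ≤ x
        · have hc : (cell n.toNat x : Int) = x := by
            unfold cell
            rw [if_neg (by omega)]
            omega
          rw [hc] at hg
          exact ⟨x, [], UFPath.nil x hg, by simp⟩
        · have hxx : (cell n.toNat x : Int) ≠ x := by
            unfold cell
            rw [if_pos (by omega)]
            omega
          have hclt := cell_lt hx0 hx1
          have hcI : InR ((List.range n.toNat).map (fun (i : Nat) => (i : Int)))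
              ((cell n.toNat x : Nat) : Int) :=
            ⟨by rw [hlen]; omega, by rw [hlen]; omega⟩
          have hg2 := hread _ hcI
          rw [cell_natCast] at hg2
          refine ⟨(cell n.toNat x : Nat), [x], UFPath.cons x _ [] (by rw [hg]; exact hxx) ?_,
            by simp⟩
          rw [hg]
          exact UFPath.nil _ hg2
    have hSI0 : SimInv 1 ((List.range n.toNat).map (fun (i : Nat) => (i : Int)))
        (List.replicate n.toNat 0)
        ((List.range n.toNat).map (fun (i : Nat) => (i : Int)))
        (List.replicate n.toNat 0) := by
      refine ⟨by simp [hlen], rfl, by simp [hlen], hgood, ?_, ?_⟩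
      · intro j hj hroot
        exact lget_replicate0 _ _
      · intro j hj
        rw [hlen] at hj
        have hjI : InR ((List.range n.toNat).map (fun (i : Nat) => (i : Int))) (j : Int) :=
          ⟨by rw [hlen]; omega, by rw [hlen]; exact_mod_cast hj⟩
        have hg := hread _ hjI
        rw [cell_natCast] at hg
        rw [hg, lget_replicate0]
        exact ⟨[], UFPath.nil _ hg, rfl⟩
    have hEio : ∀ e ∈ e0 :: rest0, InR ((List.range n.toNat).map (fun (i : Nat) => (i : Int)))
        (e.getD 0 0) ∧ InR ((List.range n.toNat).map (fun (i : Nat) => (i : Int))) (e.getD 1 0) := by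
      intro e he
      obtain ⟨-, h0, h1, h2, h3⟩ := hE e he
      constructor
      · exact ⟨by rw [hlen]; omega, by rw [hlen]; omega⟩
      · exact ⟨by rw [hlen]; omega, by rw [hlen]; omega⟩
    have := loop_eq (F := 3 * (e0 :: rest0).length + 2) (e0 :: rest0)
      ((List.range n.toNat).map (fun (i : Nat) => (i : Int))) (List.replicate n.toNat 0)
      ((List.range n.toNat).map (fun (i : Nat) => (i : Int))) (List.replicate n.toNat 0)
      (List.replicate n.toNat 1) 0 1 hSI0 hEio (by simp only [List.length_cons]; omega)
    rw [hlen] at this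
    exact this.symm
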